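-- pv_equiv track=rewrite | github.com/pokerdio/generic | euler/euler-741.py | go
-- ===== SOURCE A (Python) =====
-- def gen1d(n):
--     for i in range(n - 1):
--         for j in range(i + 1, n):
--             yield (0,) * i + (1,) + (0,) * (j - i - 1) + (1,) + (n - j - 1) * (0,)
--
-- def go(n, lvl=0, rows=()):
--     sum = [0] * n
--     for row in rows:
--         sum = [sum[i] + row[i] for i in range(n)]
--     for row in gen1d(n):
--         ok = True
--         for i in range(n):
--             if sum[i] + row[i] > 2:
--                 ok = False
--                 break
--         if not ok:
--             continue
--         newrows = rows + (row,)
--         if lvl + 1 == n: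
--             yield newrows
--         else:
--             yield from go(n, lvl + 1, newrows)
-- ===== SOURCE B (Python) =====
-- def go(n, lvl=0, rows=()):
--     if lvl >= n:
--         return
--     cands = [(0,) * i + (1,) + (0,) * (j - i - 1) + (1,) + (n - j - 1) * (0,)
--              for i in range(n - 1) for j in range(i + 1, n)]
--     s0 = [sum(r[k] for r in rows) for k in range(n)]
--     partials = [(tuple(rows), s0)]
--     for _ in range(n - lvl):
--         if not partials:
--             break
--         nxt = []
--         for rs, s in partials:
--             for row in cands:
--                 if all(s[k] + row[k] <= 2 for k in range(n)):
--                     nxt.append((rs + (row,), [s[k] + row[k] for k in range(n)]))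
--         partials = nxt
--     for rs, _ in partials:
--         yield rs
-- ===== Notes on version B (the rewrite author's own statement) =====
-- stated objective: alternative
-- what changed: The recursive DFS generator that recomputes the column-sum vector from scratch at every node is replaced by an iterative level-by-level frontier expansion (breadth-first over the n-lvl remaining levels) that carries each partial matrix together with an incrementally updated column-sum vector; the leaf order is preserved because all solutions sit at the same depth, where DFS leaf order equals lexicographic frontier order.
import Mathlib
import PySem

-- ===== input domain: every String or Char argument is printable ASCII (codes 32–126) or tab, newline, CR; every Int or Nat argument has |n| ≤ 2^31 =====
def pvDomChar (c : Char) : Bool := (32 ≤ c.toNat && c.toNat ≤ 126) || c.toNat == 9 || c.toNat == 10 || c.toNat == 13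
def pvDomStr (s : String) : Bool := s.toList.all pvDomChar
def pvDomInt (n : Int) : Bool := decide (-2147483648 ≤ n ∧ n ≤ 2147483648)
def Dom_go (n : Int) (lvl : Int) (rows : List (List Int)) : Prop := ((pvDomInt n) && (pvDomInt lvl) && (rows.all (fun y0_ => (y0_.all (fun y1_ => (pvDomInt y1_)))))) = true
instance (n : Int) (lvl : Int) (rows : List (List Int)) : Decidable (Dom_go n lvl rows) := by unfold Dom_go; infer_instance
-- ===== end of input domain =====

-- B replaces the recursive DFS (which recomputes column sums at every node) by an
-- iterative level-by-level frontier expansion carrying incrementally updated column sums.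

-- ===== PORT A =====
-- gen1d(n): the candidate rows, in generator order
def gen1d (n : Int) : List (List Int) :=
  (PySem.List.pyRange 0 (n-1) 1).flatMap (fun i =>
    (PySem.List.pyRange (i+1) n 1).map (fun j =>
      List.replicate i.toNat (0:Int) ++ [1] ++ List.replicate (j-i-1).toNat 0
        ++ [1] ++ List.replicate (n-j-1).toNat 0))

-- A's column-sum loop: sum = [0]*n; for row in rows: sum = [sum[i]+row[i] for i in range(n)]
-- pyGetD with default 0 stands for Python's sum[i]/row[i]; Pre_go excludes the IndexError inputs.
def sumsA (n : Int) (rows : List (List Int)) : List Int :=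
  rows.foldl
    (fun s row => (PySem.List.pyRange 0 n 1).map
      (fun i => PySem.List.pyGetD s i 0 + PySem.List.pyGetD row i 0))
    (List.replicate n.toNat 0)

-- the ok-loop with break: all indices pass the test
def okA (n : Int) (s row : List Int) : Bool :=
  (PySem.List.pyRange 0 n 1).all
    (fun i => PySem.List.pyGetD s i 0 + PySem.List.pyGetD row i 0 ≤ 2)

-- fuel makes the recursion total; fuel (n-lvl).toNat+1 is exhausted only inside
-- subtrees with n ≤ lvl, where the result is [] anyway (see lemma goF_of_le below).
def goF : Nat → Int → Int → List (List Int) → List (List (List Int))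
  | 0, _, _, _ => []
  | f+1, n, lvl, rows =>
    let s := sumsA n rows
    (gen1d n).foldl
      (fun acc row =>
        if okA n s row then
          if lvl + 1 = n then acc ++ [rows ++ [row]]
          else acc ++ goF f n (lvl + 1) (rows ++ [row])
        else acc) []

def go (n : Int) (lvl : Int) (rows : List (List Int)) : List (List (List Int)) :=
  goF ((n - lvl).toNat + 1) n lvl rows

-- ===== PORT B =====
-- candidate list (same comprehension as the Python list comprehension in B)
def candsB (n : Int) : List (List Int) :=
  (PySem.List.pyRange 0 (n-1) 1).flatMap (fun i =>
    (PySem.List.pyRange (i+1) n 1).map (fun j =>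
      List.replicate i.toNat (0:Int) ++ [1] ++ List.replicate (j-i-1).toNat 0
        ++ [1] ++ List.replicate (n-j-1).toNat 0))

-- s0 = [sum(r[k] for r in rows) for k in range(n)]
def sumsB (n : Int) (rows : List (List Int)) : List Int :=
  (PySem.List.pyRange 0 n 1).map
    (fun k => (rows.map (fun r => PySem.List.pyGetD r k 0)).sum)

def validB (n : Int) (s row : List Int) : Bool :=
  (PySem.List.pyRange 0 n 1).all
    (fun k => PySem.List.pyGetD s k 0 + PySem.List.pyGetD row k 0 ≤ 2)

def addB (n : Int) (s row : List Int) : List Int :=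
  (PySem.List.pyRange 0 n 1).map
    (fun k => PySem.List.pyGetD s k 0 + PySem.List.pyGetD row k 0)

-- one frontier expansion: the nested for/append loops of B
def expandB (n : Int) (cands : List (List Int)) (ps : List (List (List Int) × List Int)) :
    List (List (List Int) × List Int) :=
  ps.foldl
    (fun nxt p =>
      nxt ++ cands.foldl
        (fun acc row =>
          if validB n p.2 row then acc ++ [(p.1 ++ [row], addB n p.2 row)] else acc) [])
    []

-- for _ in range(n - lvl): if not partials: break; partials = expand(partials)
def loopB (n : Int) (cands : List (List Int)) : Nat → List (List (List Int) × List Int) → List (List (List Int) × List Int)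
  | 0, ps => ps
  | k+1, ps => if ps = [] then ps else loopB n cands k (expandB n cands ps)

def go_alt (n : Int) (lvl : Int) (rows : List (List Int)) : List (List (List Int)) :=
  if n ≤ lvl then []
  else
    (loopB n (candsB n) (n - lvl).toNat [(rows, sumsB n rows)]).map Prod.fst

-- ===== PRECONDITION & SPEC =====
-- Pre_go: A's column-sum comprehension reads row[i] for i in range(n), the largest
-- being n - 1; Pre_go holds when that index is within every row of rows (or n ≤ 0,
-- when range(n) is empty) — exactly the inputs where Python A does not raise IndexError.
def Pre_go (n : Int) (lvl : Int) (rows : List (List Int)) : Prop :=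
  ∀ row ∈ rows, n - 1 < (row.length : Int) ∨ n ≤ 0
instance (n : Int) (lvl : Int) (rows : List (List Int)) : Decidable (Pre_go n lvl rows) := by
  unfold Pre_go; infer_instance
def pvWitness_go : Int × Int × List (List Int) := (2, 0, [])

def Spec_go (n : Int) (lvl : Int) (rows : List (List Int)) (out : List (List (List Int))) : Prop := out = go_alt n lvl rows
instance (n : Int) (lvl : Int) (rows : List (List Int)) (out : List (List (List Int))) : Decidable (Spec_go n lvl rows out) := by unfold Spec_go; infer_instance

-- ===== CLAIM (what is proved, stated in full; the proofs are below) =====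
def Claim_equal_go : Prop := ∀ (n : Int) (lvl : Int) (rows : List (List Int)), Dom_go n lvl rows → Pre_go n lvl rows → Spec_go n lvl rows (go n lvl rows)
-- ===== LEMMAS AND PROOFS =====

-- generic: a loop 'if p x: out += g(x)' is a flatMap over the filtered list
theorem pv_flatMap_ite_filter {α β : Type} (l : List α) (p : α → Bool) (g : α → List β) :
    l.flatMap (fun x => if p x then g x else []) = (l.filter p).flatMap g := by
  induction l with
  | nil => simp
  | cons a l ih =>
    by_cases h : p a <;> simp [h, ih]

theorem goF_succ (f : Nat) (n lvl : Int) (rows : List (List Int)) :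
    goF (f+1) n lvl rows =
      ((gen1d n).filter (okA n (sumsA n rows))).flatMap
        (fun row => if lvl + 1 = n then [rows ++ [row]]
                    else goF f n (lvl + 1) (rows ++ [row])) := by
  show (gen1d n).foldl _ [] = _
  have h : ∀ (acc : List (List (List Int))) (row : List Int),
      (if okA n (sumsA n rows) row then
        if lvl + 1 = n then acc ++ [rows ++ [row]]
        else acc ++ goF f n (lvl + 1) (rows ++ [row])
      else acc)
      = acc ++ (if okA n (sumsA n rows) row then
          (if lvl + 1 = n then [rows ++ [row]] else goF f n (lvl + 1) (rows ++ [row]))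
          else []) := by
    intro acc row; split_ifs <;> simp
  calc (gen1d n).foldl _ []
      = (gen1d n).foldl (fun acc row => acc ++ (if okA n (sumsA n rows) row then
          (if lvl + 1 = n then [rows ++ [row]] else goF f n (lvl + 1) (rows ++ [row]))
          else [])) [] := by
        congr 1; funext acc row; exact h acc row
    _ = (gen1d n).flatMap (fun row => if okA n (sumsA n rows) row then
          (if lvl + 1 = n then [rows ++ [row]] else goF f n (lvl + 1) (rows ++ [row]))
          else []) := by
        rw [PySem.List.foldl_append_eq_flatMap]; simp
    _ = _ := pv_flatMap_ite_filter _ _ _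

theorem expandB_eq (n : Int) (cands : List (List Int)) (ps : List (List (List Int) × List Int)) :
    expandB n cands ps
      = ps.flatMap (fun p => (cands.filter (validB n p.2)).map
          (fun row => (p.1 ++ [row], addB n p.2 row))) := by
  show ps.foldl _ [] = _
  have h : ∀ p : List (List Int) × List Int,
      cands.foldl (fun acc row =>
          if validB n p.2 row then acc ++ [(p.1 ++ [row], addB n p.2 row)] else acc) []
        = (cands.filter (validB n p.2)).map (fun row => (p.1 ++ [row], addB n p.2 row)) := by
    intro p
    rw [PySem.List.foldl_append_if]; simp
  calc ps.foldl _ []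
      = ps.foldl (fun nxt p => nxt ++ (cands.filter (validB n p.2)).map
          (fun row => (p.1 ++ [row], addB n p.2 row))) [] := by
        congr 1; funext nxt p; rw [h]
    _ = _ := by rw [PySem.List.foldl_append_eq_flatMap]; simp

theorem expandB_nil (n : Int) (cands : List (List Int)) : expandB n cands [] = [] := rfl

theorem expandB_append (n : Int) (cands : List (List Int)) (ps qs : List (List (List Int) × List Int)) :
    expandB n cands (ps ++ qs) = expandB n cands ps ++ expandB n cands qs := by
  simp [expandB_eq]

theorem iterate_expandB_nil (n : Int) (cands : List (List Int)) (k : Nat) :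
    (expandB n cands)^[k] [] = [] := by
  induction k with
  | zero => rfl
  | succ k ih => rw [Function.iterate_succ_apply, expandB_nil, ih]

theorem loopB_eq_iterate (n : Int) (cands : List (List Int)) (k : Nat)
    (ps : List (List (List Int) × List Int)) :
    loopB n cands k ps = (expandB n cands)^[k] ps := by
  induction k generalizing ps with
  | zero => rfl
  | succ k ih =>
    show (if ps = [] then ps else loopB n cands k (expandB n cands ps)) = _
    by_cases h : ps = []
    · simp [h, iterate_expandB_nil]
    · rw [if_neg h, ih, Function.iterate_succ_apply]

theorem iterate_expandB_append (n : Int) (cands : List (List Int)) (k : Nat)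
    (ps qs : List (List (List Int) × List Int)) :
    (expandB n cands)^[k] (ps ++ qs)
      = (expandB n cands)^[k] ps ++ (expandB n cands)^[k] qs := by
  induction k generalizing ps qs with
  | zero => rfl
  | succ k ih => rw [Function.iterate_succ_apply, expandB_append, ih,
      Function.iterate_succ_apply, Function.iterate_succ_apply]

theorem iterate_expandB_flatMap (n : Int) (cands : List (List Int)) (k : Nat)
    (ps : List (List (List Int) × List Int)) :
    (expandB n cands)^[k] ps = ps.flatMap (fun p => (expandB n cands)^[k] [p]) := by
  induction ps with
  | nil => simp [iterate_expandB_nil]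
  | cons p ps ih =>
    have : p :: ps = [p] ++ ps := rfl
    rw [this, iterate_expandB_append, ih]; simp

-- A's foldl column sums, characterised pointwise (both sides use pyGetD with default 0)
theorem sumsA_fold (n : Int) (rows : List (List Int)) (f : Int → Int) :
    rows.foldl
      (fun s row => (PySem.List.pyRange 0 n 1).map
        (fun i => PySem.List.pyGetD s i 0 + PySem.List.pyGetD row i 0))
      ((PySem.List.pyRange 0 n 1).map f)
    = (PySem.List.pyRange 0 n 1).map
        (fun i => f i + (rows.map (fun r => PySem.List.pyGetD r i 0)).sum) := by
  induction rows generalizing f with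
  | nil => simp
  | cons row rows ih =>
    show rows.foldl _ ((PySem.List.pyRange 0 n 1).map _) = _
    have step : ((PySem.List.pyRange 0 n 1).map
        (fun i => PySem.List.pyGetD ((PySem.List.pyRange 0 n 1).map f) i 0 + PySem.List.pyGetD row i 0))
        = (PySem.List.pyRange 0 n 1).map (fun i => f i + PySem.List.pyGetD row i 0) := by
      apply List.map_congr_left
      intro i hi
      rw [PySem.List.mem_pyRange_one] at hi
      rw [PySem.List.pyGetD_map_pyRange_of_nonneg _ _ _ _ hi.1 hi.2]
    rw [step, ih (fun i => f i + PySem.List.pyGetD row i 0)]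
    apply List.map_congr_left
    intro i _
    simp [add_assoc]

theorem sumsA_eq_sumsB (n : Int) (rows : List (List Int)) :
    sumsA n rows = sumsB n rows := by
  have repl : List.replicate n.toNat (0:Int) = (PySem.List.pyRange 0 n 1).map (fun _ => 0) := by
    rw [List.map_const', PySem.List.length_pyRange_one]
    simp
  unfold sumsA sumsB
  rw [repl, sumsA_fold]
  simp

theorem sumsB_append (n : Int) (rows : List (List Int)) (row : List Int) :
    sumsB n (rows ++ [row]) = addB n (sumsB n rows) row := by
  unfold sumsB addB
  apply List.map_congr_left
  intro i hi
  rw [PySem.List.mem_pyRange_one] at hi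
  rw [PySem.List.pyGetD_map_pyRange_of_nonneg _ _ _ _ hi.1 hi.2]
  simp

-- the recursion yields nothing once n ≤ lvl
theorem goF_of_le (f : Nat) (n lvl : Int) (rows : List (List Int)) (h : n ≤ lvl) :
    goF f n lvl rows = [] := by
  induction f generalizing lvl rows with
  | zero => rfl
  | succ f ih =>
    rw [goF_succ]
    rw [List.flatMap_eq_nil_iff]
    intro row _
    rw [if_neg (by omega), ih (lvl + 1) _ (by omega)]

theorem pv_flatMap_single {α β : Type} (l : List α) (f : α → β) :
    l.flatMap (fun x => [f x]) = l.map f := by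
  induction l with
  | nil => rfl
  | cons a l ih => simp [ih]

theorem pv_flatMap_congr {α β : Type} {l : List α} {f g : α → List β}
    (h : ∀ a ∈ l, f a = g a) : l.flatMap f = l.flatMap g := by
  induction l with
  | nil => rfl
  | cons a l ih =>
    simp only [List.flatMap_cons]
    rw [h a (by simp), ih (fun a ha => h a (by simp [ha]))]

-- main invariant: with k = n - lvl ≥ 1 levels to go and fuel ≥ k, the DFS equals
-- the k-fold frontier expansion
theorem goF_eq_iterate (k : Nat) :
    ∀ (f : Nat) (n lvl : Int) (rows : List (List Int)), 1 ≤ k → k ≤ f → lvl + k = n →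
    goF f n lvl rows
      = ((expandB n (gen1d n))^[k] [(rows, sumsB n rows)]).map Prod.fst := by
  induction k with
  | zero => intro _ _ _ _ h; omega
  | succ k ih =>
    intro f n lvl rows _ hf hlvl
    obtain ⟨f', rfl⟩ : ∃ f', f = f' + 1 := ⟨f - 1, by omega⟩
    rw [goF_succ, Function.iterate_succ_apply]
    have hexp : expandB n (gen1d n) [(rows, sumsB n rows)]
        = ((gen1d n).filter (validB n (sumsB n rows))).map
            (fun row => (rows ++ [row], addB n (sumsB n rows) row)) := by
      rw [expandB_eq]; simp
    rw [hexp]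
    by_cases hk : k = 0
    · -- leaf level: lvl + 1 = n
      subst hk
      have hleaf : lvl + 1 = n := by omega
      rw [sumsA_eq_sumsB]
      have hov : okA n (sumsB n rows) = validB n (sumsB n rows) := rfl
      simp [hov, hleaf, List.map_map, Function.comp_def]
      exact pv_flatMap_single _ _
    · -- interior level: lvl + 1 ≠ n, recurse with IH
      have hne : ¬ (lvl + 1 = n) := by omega
      rw [iterate_expandB_flatMap, sumsA_eq_sumsB]
      simp only [List.flatMap_map, List.map_flatMap]
      apply pv_flatMap_congr
      intro row _
      rw [if_neg hne, ih f' n (lvl + 1) (rows ++ [row]) (by omega) (by omega) (by omega),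
          sumsB_append]

theorem loopB_spec (n lvl : Int) (rows : List (List Int)) (h : lvl < n) :
    go n lvl rows = go_alt n lvl rows := by
  have hk : ((n - lvl).toNat : Int) = n - lvl := Int.toNat_of_nonneg (by omega)
  have h1 : 1 ≤ (n - lvl).toNat := by omega
  unfold go go_alt
  rw [if_neg (by omega), loopB_eq_iterate]
  have : candsB n = gen1d n := rfl
  rw [this]
  exact goF_eq_iterate (n - lvl).toNat ((n - lvl).toNat + 1) n lvl rows h1 (by omega) (by omega)

-- ===== VERDICT (by name: the statement is the Claim_ definition above) =====
theorem go_spec : Claim_equal_go := by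
  intro n lvl rows _ _
  unfold Spec_go
  by_cases h : n ≤ lvl
  · show go n lvl rows = go_alt n lvl rows
    unfold go go_alt
    rw [if_pos h, goF_of_le _ _ _ _ h]
  · exact loopB_spec n lvl rows (by omega)
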